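-- pv_equiv track=rewrite | github.com/aa694849243/leetcode_cj | 2607. 使子数组元素和相等.py | makeSubKSumEqual
-- ===== SOURCE A (Python) =====
-- from typing import List
--
-- def gcd(x, y):
--     if y == 0:
--         return x
--     else:
--         return gcd(y, x % y)
--
-- def makeSubKSumEqual(arr: List[int], k: int) -> int:
--     t = gcd(len(arr), k)
--     ans = 0
--     for i in range(t):
--         tmp = sorted(arr[i::t])
--         mid= len(tmp) // 2
--         ans+= tmp[mid]*mid-sum(tmp[:mid])+sum(tmp[mid+1:])-tmp[mid]*(len(tmp)-mid-1)
--     return ans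
-- ===== SOURCE B (Python) =====
-- from typing import List
--
-- def _select(a, j):
--     # j-th smallest (0-based) via three-way quickselect, middle-element pivot; no sorting
--     while True:
--         p = a[len(a) // 2]
--         lt = [v for v in a if v < p]
--         if j < len(lt):
--             a = lt
--             continue
--         cnt = len(lt) + len([v for v in a if v == p])
--         if j < cnt:
--             return p
--         a = [v for v in a if v > p]
--         j -= cnt
--
-- def makeSubKSumEqual(arr: List[int], k: int) -> int:
--     # gcd of len(arr) and k, iteratively
--     x, y = len(arr), k
--     while y:
--         x, y = y, x % y
--     t = x
--     # single bucketing pass into residue classes mod t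
--     buckets = [[] for _ in range(t)]
--     for i, v in enumerate(arr):
--         buckets[i % t].append(v)
--     # cost of a group: quickselect its lower median, then sum absolute deviations
--     ans = 0
--     for g in buckets:
--         med = _select(g, len(g) // 2)
--         for v in g:
--             ans += abs(v - med)
--     return ans
-- ===== Notes on version B (the rewrite author's own statement) =====
-- stated objective: alternative
-- what changed: B never sorts: it buckets elements by index residue in one enumerate pass, finds each group's lower median with a three-way quickselect (middle-element pivot), and sums absolute deviations from it, replacing A's per-residue strided slicing + sort + median prefix/suffix-sum formula.
-- outside the precondition, e.g. on makeSubKSumEqual([1, 2], -2): A returns 0, B raises IndexError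
import Mathlib
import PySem

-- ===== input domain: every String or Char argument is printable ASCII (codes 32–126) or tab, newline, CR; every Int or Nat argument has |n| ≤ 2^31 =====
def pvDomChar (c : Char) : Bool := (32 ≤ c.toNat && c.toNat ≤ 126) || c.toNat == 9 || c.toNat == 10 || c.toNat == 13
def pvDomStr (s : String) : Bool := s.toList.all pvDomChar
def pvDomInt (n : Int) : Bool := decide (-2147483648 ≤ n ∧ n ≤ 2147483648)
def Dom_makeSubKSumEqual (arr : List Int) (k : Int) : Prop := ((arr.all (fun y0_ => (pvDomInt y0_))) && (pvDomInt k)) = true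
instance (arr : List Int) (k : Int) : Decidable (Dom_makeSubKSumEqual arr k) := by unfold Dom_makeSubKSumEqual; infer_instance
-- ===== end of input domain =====

-- B replaces A's per-residue strided slicing + sort + median prefix/suffix-sum formula by a single
-- bucketing pass over enumerate(arr) and, per group, a sort-free three-way quickselect of the lower
-- median followed by a sum of absolute deviations; an alternative algorithm of similar cost.


-- ===== PORT A =====
-- termination measure for Python's recursive gcd (used by both ports' gcd helpers)
theorem pyModAbsLt (x y : Int) (h : y ≠ 0) : (PySem.Int.mod x y).natAbs < y.natAbs := by
  rcases lt_or_gt_of_ne h with hlt | hgt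
  · have := PySem.Int.mod_neg_bounds x hlt; omega
  · have h1 := PySem.Int.mod_nonneg x hgt
    have h2 := PySem.Int.mod_lt x hgt; omega

-- A's helper: def gcd(x, y): return x if y == 0 else gcd(y, x % y)
def pyGcdA (x y : Int) : Int :=
  if y = 0 then x else pyGcdA y (PySem.Int.mod x y)
termination_by y.natAbs
decreasing_by exact pyModAbsLt x y (by assumption)

def makeSubKSumEqual (arr : List Int) (k : Int) : Int :=
  let t := pyGcdA (arr.length : Int) k
  (PySem.List.pyRange 0 t 1).foldl (fun ans i =>
    ans +
      (let tmp := PySem.List.sorted ((PySem.List.slice? arr (some i) none t).getD []) (fun x => x) false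
       let mid := PySem.Int.floordiv (tmp.length : Int) 2
       PySem.List.pyGetD tmp mid 0 * mid
         - (PySem.List.slice tmp none (some mid)).sum
         + (PySem.List.slice tmp (some (mid + 1)) none).sum
         - PySem.List.pyGetD tmp mid 0 * ((tmp.length : Int) - mid - 1))) 0

-- ===== PORT B =====
-- B's iterative gcd loop: while y: x, y = y, x % y
def pyGcdLoop (x y : Int) : Int :=
  if y = 0 then x else pyGcdLoop y (PySem.Int.mod x y)
termination_by y.natAbs
decreasing_by exact pyModAbsLt x y (by assumption)

-- B's helper _select(a, j): j-th smallest via three-way quickselect with middle-element pivot.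
-- pvPivot a is Python's a[len(a) // 2]; the 'a = []' guard only makes the recursion total:
-- Python raises IndexError there and Pre_ keeps such calls out of reach.
def pvPivot (a : List Int) : Int :=
  PySem.List.pyGetD a (PySem.Int.floordiv (a.length : Int) 2) 0

theorem pvPivot_mem (a : List Int) (h : a ≠ []) : pvPivot a ∈ a := by
  unfold pvPivot
  have h2 : PySem.Int.floordiv (a.length : Int) 2 = ((a.length / 2 : Nat) : Int) := by
    exact_mod_cast PySem.Int.floordiv_natCast a.length 2
  rw [h2, PySem.List.pyGetD_natCast]
  have hlt : a.length / 2 < a.length := by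
    have := List.length_pos_iff.mpr h; omega
  rw [List.getD_eq_getElem a 0 hlt]
  exact List.getElem_mem hlt

def pvSelect (a : List Int) (j : Int) : Int :=
  if ha : a = [] then 0
  else
    if j < ((a.filter (fun v => v < pvPivot a)).length : Int) then
      pvSelect (a.filter (fun v => v < pvPivot a)) j
    else
      if j < ((a.filter (fun v => v < pvPivot a)).length : Int)
             + ((a.filter (fun v => v == pvPivot a)).length : Int) then
        pvPivot a
      else
        pvSelect (a.filter (fun v => pvPivot a < v))
          (j - (((a.filter (fun v => v < pvPivot a)).length : Int)
                + ((a.filter (fun v => v == pvPivot a)).length : Int)))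
termination_by a.length
decreasing_by
  · rw [List.length_unattach]
    conv_rhs => rw [← List.length_attach (l := a)]
    refine List.length_filter_lt_length_iff_exists.mpr ?_
    exact ⟨⟨pvPivot a, pvPivot_mem a ha⟩, List.mem_attach a _, by simp⟩
  · rw [List.length_unattach]
    conv_rhs => rw [← List.length_attach (l := a)]
    refine List.length_filter_lt_length_iff_exists.mpr ?_
    exact ⟨⟨pvPivot a, pvPivot_mem a ha⟩, List.mem_attach a _, by simp⟩

-- B's single bucketing pass: for i, v in enumerate(arr): buckets[i % t].append(v)
def fillBuckets (t : Int) (ps : List (Int × Int)) (bs : List (List Int)) : List (List Int) :=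
  ps.foldl (fun bs p =>
    PySem.List.pySetD bs (PySem.Int.mod p.1 t)
      (PySem.List.pyGetD bs (PySem.Int.mod p.1 t) [] ++ [p.2])) bs

def makeSubKSumEqual_alt (arr : List Int) (k : Int) : Int :=
  let t := pyGcdLoop (arr.length : Int) k
  let buckets := fillBuckets t (PySem.List.enumerate arr 0)
      ((PySem.List.pyRange 0 t 1).map (fun _ => ([] : List Int)))
  buckets.foldl (fun ans g =>
    let med := pvSelect g (PySem.Int.floordiv (g.length : Int) 2)
    g.foldl (fun a v => a + |v - med|) ans) 0

-- ===== PRECONDITION & SPEC =====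
-- Pre_ excludes (a) empty arr with k > 0, where A raises IndexError indexing the empty residue
-- group, and (b) nonempty arr with k < 0, a corner outside the problem's domain where A's
-- recursive gcd comes out negative so A's loop never runs and it returns 0, while B raises IndexError.
def Pre_makeSubKSumEqual (arr : List Int) (k : Int) : Prop :=
  (arr = [] ∧ k ≤ 0) ∨ (arr ≠ [] ∧ 0 ≤ k)
instance (arr : List Int) (k : Int) : Decidable (Pre_makeSubKSumEqual arr k) := by
  unfold Pre_makeSubKSumEqual; infer_instance

def pvWitness_makeSubKSumEqual : List Int × Int := ([1, 4, 1, 3], 2)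

def Spec_makeSubKSumEqual (arr : List Int) (k : Int) (out : Int) : Prop := out = makeSubKSumEqual_alt arr k
instance (arr : List Int) (k : Int) (out : Int) : Decidable (Spec_makeSubKSumEqual arr k out) := by unfold Spec_makeSubKSumEqual; infer_instance

-- ===== CLAIM (what is proved, stated in full; the proofs are below) =====
def Claim_equal_makeSubKSumEqual : Prop := ∀ (arr : List Int) (k : Int), Dom_makeSubKSumEqual arr k → Pre_makeSubKSumEqual arr k → Spec_makeSubKSumEqual arr k (makeSubKSumEqual arr k)

-- ===== LEMMAS AND PROOFS =====

theorem pvFilter_lt_of_mem {p : Int → Bool} {a : List Int} {x : Int}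
    (hx : x ∈ a) (hp : p x = false) : (a.filter p).length < a.length := by
  refine List.length_filter_lt_length_iff_exists.mpr ?_
  exact ⟨x, hx, by simp [hp]⟩


-- the two gcd helpers have the same recursion
theorem gcdLoop_eq_gcdA (x y : Int) : pyGcdLoop x y = pyGcdA x y := by
  induction x, y using pyGcdA.induct with
  | case1 x => rw [pyGcdLoop, pyGcdA]; simp
  | case2 x y h ih => rw [pyGcdLoop, pyGcdA]; simp [h, ih]

-- on casts of naturals both gcds compute Nat.gcd
theorem gcdA_natCast (b a : Nat) : pyGcdA (a : Int) (b : Int) = (Nat.gcd a b : Int) := by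
  induction b using Nat.strong_induction_on generalizing a with
  | _ b ih =>
    rw [pyGcdA]
    by_cases hb : b = 0
    · subst hb; simp
    · have hbpos : (0:Int) < (b:Int) := by exact_mod_cast Nat.pos_of_ne_zero hb
      rw [if_neg (by exact_mod_cast hb)]
      rw [PySem.Int.mod_eq_emod_of_pos hbpos]
      have : ((a : Int) % (b : Int)) = ((a % b : Nat) : Int) := by push_cast; ring
      rw [this, ih (a % b) (Nat.mod_lt _ (Nat.pos_of_ne_zero hb))]
      congr 1
      calc Nat.gcd b (a % b) = Nat.gcd (a % b) b := Nat.gcd_comm _ _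
        _ = Nat.gcd b a := (Nat.gcd_rec b a).symm
        _ = Nat.gcd a b := Nat.gcd_comm _ _

-- canonical residue group: every g-th element of arr starting at j (m groups of size g)
def pvGroup (arr : List Int) (g m j : Nat) : List Int :=
  (List.range m).map (fun c => arr.getD (c * g + j) 0)

-- A's strided slice arr[j::g] is the canonical residue group
theorem slice_eq_group (arr : List Int) (g m j : Nat) (hg : 0 < g) (hj : j < g)
    (hlen : arr.length = m * g) :
    (PySem.List.slice? arr (some (j : Int)) none (g : Int)).getD [] = pvGroup arr g m j := by
  have hgz : ((g:Int) ≠ 0) := by exact_mod_cast hg.ne'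
  have hjn : j < arr.length ∨ m = 0 := by
    rcases Nat.eq_zero_or_pos m with h | h
    · right; exact h
    · left; calc j < g := hj
        _ ≤ m * g := Nat.le_mul_of_pos_left g h
        _ = arr.length := hlen.symm
  unfold PySem.List.slice? PySem.List.sliceIndices
  rw [if_neg hgz]
  simp only [Option.getD_some]
  have hglt : ¬ ((g:Int) < 0) := by omega
  simp only [if_neg hglt]
  rcases hjn with hjn | hm0
  · have h1 : ¬ ((j:Int) < 0) := by omega
    have h2 : min (j:Int) (arr.length:Int) = (j:Int) := by omega
    simp only [if_neg h1, h2]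
    have h3 : (0:Int) < (g:Int) := by exact_mod_cast hg
    rw [if_pos h3, if_pos (by exact_mod_cast hjn)]
    have hcount : ((((arr.length:Int) - (j:Int)) + (g:Int) - 1) / (g:Int)).toNat = m := by
      have he : (((arr.length:Int) - (j:Int)) + (g:Int) - 1) = ((m * g + (g - 1 - j) : Nat) : Int) := by
        push_cast; omega
      rw [he, ← Int.natCast_div, Int.toNat_natCast]
      have hr : g - 1 - j < g := by omega
      rw [Nat.add_comm, Nat.add_mul_div_right _ _ hg, Nat.div_eq_of_lt hr]
      omega
    rw [hcount]
    have hcg : ∀ c ∈ List.range m,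
        arr[((j:Int) + (g:Int) * (c:Int)).toNat]? = some (arr.getD (c * g + j) 0) := by
      intro c hc
      rw [List.mem_range] at hc
      have hidx : ((j:Int) + (g:Int) * (c:Int)) = ((c * g + j : Nat) : Int) := by
        push_cast; ring
      rw [hidx, Int.toNat_natCast]
      have hlt : c * g + j < arr.length := by
        rw [hlen]
        calc c * g + j < c * g + g := by omega
          _ = (c + 1) * g := by ring
          _ ≤ m * g := Nat.mul_le_mul_right g (by omega)
      rw [List.getElem?_eq_getElem hlt, List.getD_eq_getElem arr 0 hlt]
    rw [List.filterMap_congr hcg]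
    unfold pvGroup
    simp
  · subst hm0
    have h0 : arr.length = 0 := by simpa using hlen
    have h1 : ¬ ((j:Int) < 0) := by omega
    simp only [if_neg h1, h0]
    have h3 : (0:Int) < (g:Int) := by exact_mod_cast hg
    rw [if_pos h3]
    simp [pvGroup]

-- fillBuckets preserves the number of buckets
theorem fill_length (t : Int) (ps : List (Int × Int)) (bs : List (List Int)) :
    (fillBuckets t ps bs).length = bs.length := by
  induction ps generalizing bs with
  | nil => rfl
  | cons p ps ih => simp [fillBuckets, List.foldl_cons] at ih ⊢; rw [ih, PySem.List.length_pySetD]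

-- contents of a bucket after the fill loop: the matching-residue entries, appended in order
theorem fill_getD (g : Nat) (hg : 0 < g) (ps : List (Int × Int)) (bs : List (List Int))
    (hps : ∀ p ∈ ps, 0 ≤ p.1) (j : Nat) (hj : j < g) (hb : bs.length = g) :
    (fillBuckets (g : Int) ps bs).getD j [] =
      bs.getD j [] ++ (ps.filter (fun p => PySem.Int.mod p.1 (g : Int) == (j : Int))).map (·.2) := by
  induction ps generalizing bs with
  | nil => simp [fillBuckets]
  | cons p ps ih =>
    have hp0 : 0 ≤ p.1 := hps p (by simp)
    have hgz : (0:Int) < (g:Int) := by exact_mod_cast hg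
    have hmn := PySem.Int.mod_nonneg p.1 hgz
    have hml := PySem.Int.mod_lt p.1 hgz
    set r : Nat := (PySem.Int.mod p.1 (g:Int)).toNat with hr
    have hrc : PySem.Int.mod p.1 (g:Int) = (r : Int) := by omega
    have hrg : r < g := by omega
    have step : fillBuckets (g:Int) (p :: ps) bs =
        fillBuckets (g:Int) ps (PySem.List.pySetD bs (r:Int) (PySem.List.pyGetD bs (r:Int) [] ++ [p.2])) := by
      simp [fillBuckets, List.foldl_cons, hrc]
    rw [step]
    have hb' : (PySem.List.pySetD bs (r:Int) (PySem.List.pyGetD bs (r:Int) [] ++ [p.2])).length = g := by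
      rw [PySem.List.length_pySetD]; exact hb
    rw [ih _ (fun q hq => hps q (by simp [hq])) hb']
    rw [List.filter_cons]
    have hget : PySem.List.pyGetD bs (r:Int) [] = bs.getD r [] := PySem.List.pyGetD_natCast bs r []
    have hsetget : (PySem.List.pySetD bs (r:Int) (bs.getD r [] ++ [p.2])).getD j [] =
        if j = r then bs.getD r [] ++ [p.2] else bs.getD j [] := by
      have h2 := PySem.List.pyGetD_pySetD_natCast bs r j (bs.getD r [] ++ [p.2]) [] (by omega)
      rw [PySem.List.pyGetD_natCast, PySem.List.pyGetD_natCast] at h2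
      exact h2
    rw [hget, hsetget]
    by_cases hcase : j = r
    · subst hcase
      simp [hrc]
    · have hbf : (PySem.Int.mod p.1 (g:Int) == (j:Int)) = false := by
        rw [hrc]; simp; omega
      rw [hbf]
      simp [hcase]

-- one aligned block of g consecutive indices contributes exactly its j-th element
theorem block_filter (g j : Nat) (hg : 0 < g) (hj : j < g) :
    ∀ (block : List Int) (q : Nat), block.length ≤ g →
    (PySem.List.enumerate block ((q * g + (g - block.length) : Nat) : Int)).filter
        (fun p => PySem.Int.mod p.1 (g : Int) == (j : Int)) =
      if g - block.length ≤ j then [(((q * g + j : Nat) : Int), block.getD (j - (g - block.length)) 0)] else [] := by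
  intro block
  induction block with
  | nil =>
    intro q _
    rw [if_neg (by simp; omega)]
    simp [PySem.List.enumerate]
  | cons x rest ih =>
    intro q hlen
    simp only [List.length_cons] at hlen ⊢
    rw [PySem.List.enumerate_cons]
    rw [List.filter_cons]
    have hgz : (0:Int) < (g:Int) := by exact_mod_cast hg
    have hsmod : PySem.Int.mod ((q * g + (g - (rest.length + 1)) : Nat) : Int) (g : Int)
        = (((g - (rest.length + 1)) % g : Nat) : Int) := by
      rw [PySem.Int.mod_eq_emod_of_pos hgz]
      push_cast
      conv_lhs => rw [Int.add_comm, Int.add_mul_emod_self_right]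
    have hmodlt : (g - (rest.length + 1)) % g = g - (rest.length + 1) :=
      Nat.mod_eq_of_lt (by omega)
    by_cases hcase : g - (rest.length + 1) = j
    · -- head is kept
      have htest : (PySem.Int.mod ((q * g + (g - (rest.length + 1)) : Nat) : Int) (g : Int) == (j : Int)) = true := by
        rw [hsmod, hmodlt, hcase]; simp
      rw [htest]
      have hstep : (((q * g + (g - (rest.length + 1)) : Nat) : Int) + 1) = ((q * g + (g - rest.length) : Nat) : Int) := by
        push_cast; omega
      rw [hstep, ih q (by omega)]
      have hA : ¬ (g - rest.length ≤ j) := by omega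
      have hB : g - (rest.length + 1) ≤ j := by omega
      rw [if_neg hA, if_pos hB]
      have : j - (g - (rest.length + 1)) = 0 := by omega
      rw [this]
      simp only [List.getD_cons_zero]
      have : q * g + j = q * g + (g - (rest.length + 1)) := by omega
      rw [this]
      simp
    · -- head is dropped
      have htest : (PySem.Int.mod ((q * g + (g - (rest.length + 1)) : Nat) : Int) (g : Int) == (j : Int)) = false := by
        rw [hsmod, hmodlt]
        simp
        omega
      rw [htest]
      have hstep : (((q * g + (g - (rest.length + 1)) : Nat) : Int) + 1) = ((q * g + (g - rest.length) : Nat) : Int) := by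
        push_cast; omega
      rw [hstep, ih q (by omega)]
      by_cases hc2 : g - rest.length ≤ j
      · have hB : g - (rest.length + 1) ≤ j := by omega
        rw [if_pos hc2, if_pos hB]
        have : j - (g - (rest.length + 1)) = (j - (g - rest.length)) + 1 := by omega
        rw [this]
        simp only [List.getD_cons_succ]
        simp
      · have hB : ¬ (g - (rest.length + 1) ≤ j) := by omega
        rw [if_neg hc2, if_neg hB]
        simp

-- the enumeration filtered to one residue class is the canonical residue group
theorem gather_eq_group (g j : Nat) (hg : 0 < g) (hj : j < g) :
    ∀ (m : Nat) (arr : List Int) (q : Nat), arr.length = m * g →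
    ((PySem.List.enumerate arr ((q * g : Nat) : Int)).filter
        (fun p => PySem.Int.mod p.1 (g : Int) == (j : Int))).map (·.2)
      = pvGroup arr g m j := by
  intro m
  induction m with
  | zero =>
    intro arr q hlen
    have : arr = [] := List.eq_nil_of_length_eq_zero (by simpa using hlen)
    subst this
    simp [pvGroup, PySem.List.enumerate]
  | succ m ih =>
    intro arr q hlen
    have hsplit : arr = arr.take g ++ arr.drop g := (List.take_append_drop g arr).symm
    have hlt : (m + 1) * g = m * g + g := by ring
    have htl : (arr.take g).length = g := by
      rw [List.length_take]; omega
    have hdl : (arr.drop g).length = m * g := by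
      rw [List.length_drop]; omega
    conv_lhs => rw [hsplit]
    rw [PySem.List.enumerate_append, List.filter_append, List.map_append]
    have hq0 : ((q * g : Nat) : Int) = ((q * g + (g - (arr.take g).length) : Nat) : Int) := by
      rw [htl]; simp
    rw [hq0, block_filter g j hg hj (arr.take g) q (by omega)]
    rw [htl, if_pos (by omega)]
    have hstart : (((q * g + (g - g) : Nat) : Int) + (g : Int))
        = (((q + 1) * g : Nat) : Int) := by
      push_cast; ring_nf; omega
    rw [hstart, ih (arr.drop g) (q + 1) hdl]
    unfold pvGroup
    rw [List.range_succ_eq_map]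
    simp only [List.map_cons, List.map_map]
    simp only [List.map_nil, List.cons_append, List.nil_append]
    congr 1
    · rw [List.getD_eq_getElem (arr.take g) 0 (by omega), List.getD_eq_getElem arr 0 (by omega)]
      simp [List.getElem_take]
    · apply List.map_congr_left
      intro c hc
      rw [List.mem_range] at hc
      simp only [Function.comp_apply]
      have hcb : (c + 1) * g ≤ m * g := Nat.mul_le_mul_right g (by omega)
      have hb1 : c * g + j < (arr.drop g).length := by
        rw [hdl]
        calc c * g + j < c * g + g := by omega
          _ = (c + 1) * g := by ring
          _ ≤ m * g := hcb
      have hb2 : Nat.succ c * g + j < arr.length := by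
        rw [hlen, hlt]
        have : Nat.succ c * g = c * g + g := by simp [Nat.succ_eq_add_one, Nat.add_mul]
        omega
      rw [List.getD_eq_getElem _ 0 hb1, List.getD_eq_getElem arr 0 hb2]
      rw [List.getElem_drop]
      congr 1
      have : Nat.succ c * g = c * g + g := by simp [Nat.succ_eq_add_one, Nat.add_mul]
      omega

-- per-group cost in A's shape (median prefix-sum formula)
def pvCostA (s : List Int) : Int :=
  (s.getD (s.length / 2) 0) * (s.length / 2 : Nat)
    - (s.take (s.length / 2)).sum + (s.drop (s.length / 2 + 1)).sum
    - (s.getD (s.length / 2) 0) * ((s.length : Int) - (s.length / 2 : Nat) - 1)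

theorem sum_map_sub_int {β : Type} (l : List β) (f g : β → Int) :
    (l.map (fun x => f x - g x)).sum = (l.map f).sum - (l.map g).sum := by
  induction l with
  | nil => simp
  | cons x xs ih => simp [ih]; ring

-- pivot three-way partition is a permutation of the list
theorem perm_three_filter (a : List Int) (p : Int) :
    (a.filter (fun v => decide (v < p)) ++ a.filter (fun v => v == p) ++ a.filter (fun v => decide (p < v))).Perm a := by
  induction a with
  | nil => simp
  | cons x a ih =>
    rcases lt_trichotomy x p with h | h | h
    · have h1 : (decide (x < p)) = true := by simp [h]
      have h2 : (x == p) = false := by simp; omega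
      have h3 : (decide (p < x)) = false := by simp; omega
      simp only [List.filter_cons, h1, h2, h3, if_true, if_neg Bool.false_ne_true]
      exact ih.cons x
    · subst h
      have h1 : (decide (x < x)) = false := by simp
      have h2 : (x == x) = true := by simp
      simp only [List.filter_cons, h1, h2, if_true, if_neg Bool.false_ne_true]
      have he : (List.filter (fun v => decide (v < x)) a ++ x :: List.filter (fun v => v == x) a) ++ List.filter (fun v => decide (x < v)) a
          = List.filter (fun v => decide (v < x)) a ++ x :: (List.filter (fun v => v == x) a ++ List.filter (fun v => decide (x < v)) a) := by
        simp
      rw [he]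
      refine List.Perm.trans List.perm_middle ?_
      refine List.Perm.cons x ?_
      rw [← List.append_assoc]
      exact ih
    · have h1 : (decide (x < p)) = false := by simp; omega
      have h2 : (x == p) = false := by simp; omega
      have h3 : (decide (p < x)) = true := by simp [h]
      simp only [List.filter_cons, h1, h2, h3, if_true, if_neg Bool.false_ne_true]
      exact List.Perm.trans List.perm_middle (ih.cons x)

-- sorted(a) decomposes along the pivot partition: sorted(lt) ++ eq ++ sorted(gt)
theorem sorted_decompose (a : List Int) (p : Int) :
    PySem.List.sorted a (fun x => x) false =
      PySem.List.sorted (a.filter (fun v => decide (v < p))) (fun x => x) false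
        ++ a.filter (fun v => v == p)
        ++ PySem.List.sorted (a.filter (fun v => decide (p < v))) (fun x => x) false := by
  have hperm : (PySem.List.sorted (a.filter (fun v => decide (v < p))) (fun x => x) false
        ++ a.filter (fun v => v == p)
        ++ PySem.List.sorted (a.filter (fun v => decide (p < v))) (fun x => x) false).Perm a := by
    refine List.Perm.trans ?_ (perm_three_filter a p)
    exact ((PySem.List.sorted_perm _ _ _).append_right _).append (PySem.List.sorted_perm _ _ _)
  have hL : (PySem.List.sorted (a.filter (fun v => decide (v < p))) (fun x => x) false).Pairwise (· ≤ ·) := by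
    have := PySem.List.sorted_pairwise (a.filter (fun v => decide (v < p))) (fun x => x)
    simpa using this
  have hG : (PySem.List.sorted (a.filter (fun v => decide (p < v))) (fun x => x) false).Pairwise (· ≤ ·) := by
    have := PySem.List.sorted_pairwise (a.filter (fun v => decide (p < v))) (fun x => x)
    simpa using this
  have hmemL : ∀ x ∈ PySem.List.sorted (a.filter (fun v => decide (v < p))) (fun x => x) false, x < p := by
    intro x hx
    rw [PySem.List.mem_sorted, List.mem_filter] at hx
    simpa using hx.2
  have hmemE : ∀ x ∈ a.filter (fun v => v == p), x = p := by
    intro x hx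
    rw [List.mem_filter] at hx
    simpa using hx.2
  have hmemG : ∀ x ∈ PySem.List.sorted (a.filter (fun v => decide (p < v))) (fun x => x) false, p < x := by
    intro x hx
    rw [PySem.List.mem_sorted, List.mem_filter] at hx
    simpa using hx.2
  have hpair : (PySem.List.sorted (a.filter (fun v => decide (v < p))) (fun x => x) false
        ++ a.filter (fun v => v == p)
        ++ PySem.List.sorted (a.filter (fun v => decide (p < v))) (fun x => x) false).Pairwise (· ≤ ·) := by
    rw [List.append_assoc, List.pairwise_append]
    refine ⟨hL, ?_, ?_⟩
    · rw [List.pairwise_append]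
      refine ⟨?_, hG, ?_⟩
      · exact List.pairwise_of_forall_mem_list (fun x hx y hy => by rw [hmemE x hx, hmemE y hy])
      · intro x hx y hy
        rw [hmemE x hx]
        exact le_of_lt (hmemG y hy)
    · intro x hx y hy
      rcases List.mem_append.mp hy with hy | hy
      · rw [hmemE y hy]; exact le_of_lt (hmemL x hx)
      · exact le_of_lt (lt_trans (hmemL x hx) (hmemG y hy))
  exact PySem.List.sorted_id_eq_of_perm_of_pairwise a _ hperm hpair

-- B's quickselect returns the j-th element of the sorted order
theorem select_correct : ∀ (n : Nat) (a : List Int), a.length = n → ∀ j : Nat, j < a.length →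
    pvSelect a (j : Int) = (PySem.List.sorted a (fun x => x) false).getD j 0 := by
  intro n
  induction n using Nat.strong_induction_on with
  | _ n ih =>
    intro a hn j hj
    have ha : a ≠ [] := by intro h; subst h; simp at hj
    rw [pvSelect, dif_neg ha]
    set p := pvPivot a with hp
    have hpmem : p ∈ a := pvPivot_mem a ha
    set L := a.filter (fun v => decide (v < p)) with hL
    set E := a.filter (fun v => v == p) with hE
    set G := a.filter (fun v => decide (p < v)) with hG
    have hdec := sorted_decompose a p
    rw [← hL, ← hE, ← hG] at hdec
    have hlenL : (PySem.List.sorted L (fun x => x) false).length = L.length :=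
      PySem.List.length_sorted L _ _
    have hlenG : (PySem.List.sorted G (fun x => x) false).length = G.length :=
      PySem.List.length_sorted G _ _
    have hsum : L.length + E.length + G.length = a.length := by
      have h := (perm_three_filter a p).length_eq
      rw [← hL, ← hE, ← hG] at h
      simp only [List.length_append] at h
      omega
    have hLlt : L.length < a.length := by
      rw [hL]; exact pvFilter_lt_of_mem hpmem (by simp)
    have hGlt : G.length < a.length := by
      rw [hG]; exact pvFilter_lt_of_mem hpmem (by simp)
    by_cases h1 : j < L.length
    · rw [if_pos (by exact_mod_cast h1)]
      rw [ih L.length (by omega) L rfl j h1]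
      rw [hdec, List.append_assoc, List.getD_append _ _ _ _ (by omega)]
    · rw [if_neg (by omega)]
      by_cases h2 : j < L.length + E.length
      · rw [if_pos (by omega)]
        rw [hdec, List.append_assoc, List.getD_append_right _ _ _ _ (by omega), hlenL]
        have hje : j - L.length < E.length := by omega
        rw [List.getD_append _ _ _ _ (by omega)]
        rw [List.getD_eq_getElem E 0 hje]
        have hmem : E[j - L.length] ∈ E := List.getElem_mem hje
        have hmem' : E[j - L.length] ∈ a.filter (fun v => v == p) := by rw [← hE]; exact hmem
        have h3 : (E[j - L.length] == p) = true := @List.of_mem_filter _ (fun v => v == p) _ _ hmem'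
        exact (beq_iff_eq.mp h3).symm
      · rw [if_neg (by omega)]
        have hcnt : (j : Int) - ((L.length : Int) + (E.length : Int))
            = ((j - (L.length + E.length) : Nat) : Int) := by omega
        rw [hcnt]
        have hjg : j - (L.length + E.length) < G.length := by omega
        rw [ih G.length (by omega) G rfl _ hjg]
        rw [hdec, List.append_assoc, List.getD_append_right _ _ _ _ (by omega), hlenL]
        rw [List.getD_append_right _ _ _ _ (by omega)]
        congr 1
        omega

-- sum of absolute deviations from the middle element of a sorted list is A's median formula
theorem abs_sum_sorted (s : List Int) (hne : s ≠ []) (hs : s.Pairwise (· ≤ ·)) :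
    (s.map (fun v => |v - s.getD (s.length / 2) 0|)).sum = pvCostA s := by
  have hlen : 0 < s.length := List.length_pos_iff.mpr hne
  set q := s.length / 2 with hq
  have hql : q < s.length := by omega
  set m := s.getD q 0 with hm
  have hget := List.pairwise_iff_getElem.mp hs
  have hmem_take : ∀ v ∈ s.take q, v ≤ m := by
    intro v hv
    obtain ⟨i, hi, hvi⟩ := List.mem_iff_getElem.mp hv
    rw [List.length_take] at hi
    have hiq : i < q := by omega
    rw [List.getElem_take] at hvi
    rw [hm, List.getD_eq_getElem s 0 hql, ← hvi]
    exact hget i q (by omega) hql hiq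
  have hmem_drop : ∀ v ∈ s.drop (q + 1), m ≤ v := by
    intro v hv
    obtain ⟨i, hi, hvi⟩ := List.mem_iff_getElem.mp hv
    rw [List.getElem_drop] at hvi
    have hil : q + 1 + i < s.length := by
      rw [List.length_drop] at hi; omega
    rw [hm, List.getD_eq_getElem s 0 hql, ← hvi]
    exact hget q (q + 1 + i) hql hil (by omega)
  have hsplit : s = s.take q ++ s[q] :: s.drop (q + 1) := by
    conv_lhs => rw [← List.take_append_drop q s]
    rw [List.drop_eq_getElem_cons hql]
  have hmq : m = s[q] := List.getD_eq_getElem s 0 hql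
  conv_lhs => rw [hsplit]
  rw [List.map_append, List.sum_append, List.map_cons, List.sum_cons]
  have htake : ((s.take q).map (fun v => |v - m|)).sum
      = m * (q : Int) - (s.take q).sum := by
    rw [List.map_congr_left (fun v hv => by
      rw [abs_of_nonpos (by have := hmem_take v hv; omega), neg_sub])]
    rw [sum_map_sub_int (s.take q) (fun _ => m) (fun v => v), List.map_id']
    have hlt : (s.take q).length = q := by rw [List.length_take]; omega
    rw [List.map_const', List.sum_replicate, hlt]
    simp [mul_comm]
  have hdrop : ((s.drop (q + 1)).map (fun v => |v - m|)).sum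
      = (s.drop (q + 1)).sum - m * ((s.length : Int) - (q : Int) - 1) := by
    rw [List.map_congr_left (fun v hv => by
      rw [abs_of_nonneg (by have := hmem_drop v hv; omega)])]
    rw [sum_map_sub_int (s.drop (q + 1)) (fun v => v) (fun _ => m), List.map_id']
    have hld : (s.drop (q + 1)).length = s.length - (q + 1) := by rw [List.length_drop]
    rw [List.map_const', List.sum_replicate, hld]
    have hc : ((s.length - (q + 1) : Nat) : Int) = (s.length : Int) - (q : Int) - 1 := by omega
    simp [hc, mul_comm]
  rw [htake, hdrop, ← hmq]
  simp only [sub_self, abs_zero]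
  unfold pvCostA
  rw [← hq, ← hm]
  ring

-- per-group equality: B's quickselect-and-deviations sum is A's cost of the sorted group
theorem group_cost (g : List Int) (hne : g ≠ []) :
    (g.map (fun v => |v - pvSelect g (PySem.Int.floordiv (g.length : Int) 2)|)).sum
      = pvCostA (PySem.List.sorted g (fun x => x) false) := by
  have hlen : 0 < g.length := List.length_pos_iff.mpr hne
  have hfd : PySem.Int.floordiv (g.length : Int) 2 = ((g.length / 2 : Nat) : Int) := by
    exact_mod_cast PySem.Int.floordiv_natCast g.length 2
  set s := PySem.List.sorted g (fun x => x) false with hsdef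
  have hslen : s.length = g.length := PySem.List.length_sorted g _ _
  have hsne : s ≠ [] := by
    intro h; rw [h] at hslen; simp at hslen; omega
  have hsp : s.Pairwise (· ≤ ·) := by
    have := PySem.List.sorted_pairwise g (fun x => x)
    rw [← hsdef] at this
    simpa using this
  have hmed : pvSelect g (PySem.Int.floordiv (g.length : Int) 2) = s.getD (s.length / 2) 0 := by
    rw [hfd, select_correct g.length g rfl (g.length / 2) (by omega), ← hsdef, hslen]
  rw [hmed]
  have hperm : (g.map (fun v => |v - s.getD (s.length / 2) 0|)).Perm
      (s.map (fun v => |v - s.getD (s.length / 2) 0|)) := by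
    refine List.Perm.map _ ?_
    rw [hsdef]
    exact (PySem.List.sorted_perm g (fun x => x) false).symm
  rw [hperm.sum_eq]
  exact abs_sum_sorted s hsne hsp

-- A's loop-body expression is pvCostA of the sorted group
theorem exprA_eq (tmp : List Int) :
    (let mid := PySem.Int.floordiv (tmp.length : Int) 2
     PySem.List.pyGetD tmp mid 0 * mid
       - (PySem.List.slice tmp none (some mid)).sum
       + (PySem.List.slice tmp (some (mid + 1)) none).sum
       - PySem.List.pyGetD tmp mid 0 * ((tmp.length : Int) - mid - 1))
    = pvCostA tmp := by
  have hfd : PySem.Int.floordiv (tmp.length : Int) 2 = ((tmp.length / 2 : Nat) : Int) := by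
    exact_mod_cast PySem.Int.floordiv_natCast tmp.length 2
  simp only [hfd]
  have hs1 : ((tmp.length / 2 : Nat) : Int) + 1 = ((tmp.length / 2 + 1 : Nat) : Int) := by push_cast; ring
  rw [hs1, PySem.List.slice_to_natCast, PySem.List.slice_from_natCast, PySem.List.pyGetD_natCast]
  unfold pvCostA
  simp [List.getD_eq_getElem?_getD]

-- ===== VERDICT (by name: the statement is the Claim_ definition above) =====
theorem makeSubKSumEqual_spec : Claim_equal_makeSubKSumEqual := by
  unfold Claim_equal_makeSubKSumEqual
  intro arr k _ hpre
  unfold Spec_makeSubKSumEqual makeSubKSumEqual makeSubKSumEqual_alt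
  dsimp only
  rw [gcdLoop_eq_gcdA]
  rcases hpre with ⟨rfl, hk⟩ | ⟨hne, hk⟩
  · -- empty input, k ≤ 0: both sides are an empty loop
    have ht : pyGcdA ((List.length ([] : List Int)) : Int) k ≤ 0 := by
      simp only [List.length_nil, Nat.cast_zero]
      by_cases hk0 : k = 0
      · subst hk0; rw [pyGcdA]; simp
      · rw [pyGcdA, if_neg hk0]
        have hm : PySem.Int.mod 0 k = 0 := by
          unfold PySem.Int.mod; simp [Int.zero_fmod]
        rw [hm, pyGcdA]
        simp [hk]
    rw [PySem.List.pyRange_one_eq_nil ht]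
    simp [fillBuckets, PySem.List.enumerate]
  · -- nonempty input, k ≥ 0
    obtain ⟨k', rfl⟩ : ∃ k' : Nat, k = (k' : Int) := ⟨k.toNat, (Int.toNat_of_nonneg hk).symm⟩
    rw [gcdA_natCast]
    set n := arr.length with hn
    have hnpos : 0 < n := List.length_pos_iff.mpr hne
    set g := Nat.gcd n k' with hgdef
    have hg : 0 < g := Nat.gcd_pos_of_pos_left _ hnpos
    obtain ⟨m, hm⟩ : g ∣ n := Nat.gcd_dvd_left n k'
    have hlen : arr.length = m * g := by rw [← hn, hm]; ring
    have hmpos : 0 < m := by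
      rcases Nat.eq_zero_or_pos m with h | h
      · subst h; simp at hlen; omega
      · exact h
    -- B's bucket list is the list of canonical residue groups
    have hbuckets : fillBuckets (g : Int) (PySem.List.enumerate arr 0)
          ((PySem.List.pyRange 0 (g : Int) 1).map (fun _ => ([] : List Int)))
        = (List.range g).map (fun j => pvGroup arr g m j) := by
      have hbl : ((PySem.List.pyRange 0 (g : Int) 1).map (fun _ => ([] : List Int))).length = g := by
        rw [List.length_map, PySem.List.length_pyRange_one]; simp
      apply List.ext_getElem
      · rw [fill_length, hbl]; simp
      · intro p h1 h2
        rw [fill_length, hbl] at h1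
        rw [← List.getD_eq_getElem _ [] h2, ← List.getD_eq_getElem _ [] (by rwa [fill_length, hbl])]
        rw [fill_getD g hg _ _ (by
              intro q hq
              rw [PySem.List.mem_enumerate_iff] at hq
              obtain ⟨c, hc, rfl⟩ := hq
              simp) p h1 hbl]
        have hinit : ((PySem.List.pyRange 0 (g : Int) 1).map (fun _ => ([] : List Int))).getD p [] = [] := by
          rw [List.getD_eq_getElem _ [] (by rwa [hbl])]
          simp
        rw [hinit, List.nil_append]
        have hq0 : (0 : Int) = ((0 * g : Nat) : Int) := by simp
        rw [List.getD_eq_getElem _ [] (by simpa using h1), List.getElem_map, List.getElem_range]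
        calc ((PySem.List.enumerate arr 0).filter
                (fun q => PySem.Int.mod q.1 (g : Int) == (p : Int))).map (·.2)
            = ((PySem.List.enumerate arr ((0 * g : Nat) : Int)).filter
                (fun q => PySem.Int.mod q.1 (g : Int) == (p : Int))).map (·.2) := by rw [← hq0]
          _ = pvGroup arr g m p := gather_eq_group g p hg h1 m arr 0 hlen
    rw [hbuckets]
    -- flatten both folds into sums over the residue groups
    rw [List.foldl_ext _ (fun (ans : Int) (gl : List Int) => ans +
          (gl.map (fun v => |v - pvSelect gl (PySem.Int.floordiv (gl.length : Int) 2)|)).sum) 0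
        (by
          intro a b _
          exact PySem.List.foldl_add b
            (fun v => |v - pvSelect b (PySem.Int.floordiv (b.length : Int) 2)|) a)]
    rw [PySem.List.pyRange_zero_nat, List.foldl_map, PySem.List.foldl_add, PySem.List.foldl_add]
    congr 1
    rw [List.map_map]
    apply congrArg List.sum
    apply List.map_congr_left
    intro j hj
    rw [List.mem_range] at hj
    simp only [Function.comp_apply]
    rw [slice_eq_group arr g m j hg hj hlen, exprA_eq]
    have hgne : pvGroup arr g m j ≠ [] := by
      unfold pvGroup
      simp [hmpos.ne']
    exact (group_cost _ hgne).symm
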